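-- pv_equiv track=rewrite | github.com/vyalsgh-tech/my-timetable-next | tools/force_fix_program_info_clean.py | remove_method_blocks
-- ===== SOURCE A (Python) =====
-- def remove_method_blocks(text):
--     lines = text.splitlines()
--     out = []
--     skip = False
--
--     for line in lines:
--         is_target_method = (
--             line.startswith('    def get_app_version_info(self):')
--             or line.startswith('    def show_program_info(self):')
--         )
--
--         if is_target_method:
--             skip = True
--             continue
--
--         if skip:
--             # 클래스 안의 다음 메서드 또는 구분선이 나오면 스킵 종료
--             if line.startswith('    def ') or line.startswith('    # =========================================='):
--                 skip = False
--                 out.append(line)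
--             else:
--                 continue
--         else:
--             out.append(line)
--
--     return '\n'.join(out) + '\n'
-- ===== SOURCE B (Python) =====
-- def remove_method_blocks(text):
--     lines = text.splitlines()
--     out = []
--     i = 0
--     n = len(lines)
--     while i < n:
--         line = lines[i]
--         if (line.startswith('    def get_app_version_info(self):')
--                 or line.startswith('    def show_program_info(self):')):
--             i += 1
--             # consume the whole removed block in an inner loop
--             while i < n:
--                 l = lines[i]
--                 if (l.startswith('    def get_app_version_info(self):')
--                         or l.startswith('    def show_program_info(self):')):
--                     i += 1
--                 elif l.startswith('    def ') or l.startswith('    # =========================================='):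
--                     out.append(l)
--                     i += 1
--                     break
--                 else:
--                     i += 1
--         else:
--             out.append(line)
--             i += 1
--     return '\n'.join(out) + '\n'
-- ===== Notes on version B (the rewrite author's own statement) =====
-- stated objective: alternative
-- what changed: Replaced A's single flat loop that carries a boolean skip flag across iterations with a cursor scan whose nested inner loop consumes each removed method block (flag state eliminated).
import Mathlib
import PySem

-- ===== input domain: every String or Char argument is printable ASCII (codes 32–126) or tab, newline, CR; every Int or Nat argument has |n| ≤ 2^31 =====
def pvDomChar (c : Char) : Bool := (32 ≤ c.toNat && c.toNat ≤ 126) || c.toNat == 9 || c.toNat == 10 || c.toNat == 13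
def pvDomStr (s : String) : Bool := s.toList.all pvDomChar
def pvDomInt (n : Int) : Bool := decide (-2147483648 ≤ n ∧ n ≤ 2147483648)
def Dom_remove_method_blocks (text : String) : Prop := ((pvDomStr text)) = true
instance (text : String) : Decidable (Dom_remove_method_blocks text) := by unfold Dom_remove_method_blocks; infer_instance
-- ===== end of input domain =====

-- B replaces A's flat loop carrying a boolean skip flag by a cursor scan whose nested
-- inner loop consumes each removed block (objective: alternative decomposition, same cost).

-- ===== PORT A =====
-- line is a flagged target method
def pvIsTarget (line : String) : Bool :=
  PySem.Str.startswith line "    def get_app_version_info(self):"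
    || PySem.Str.startswith line "    def show_program_info(self):"

-- one iteration of A's for-loop over (out, skip)
def pvStepA (st : List String × Bool) (line : String) : List String × Bool :=
  if pvIsTarget line then (st.1, true)
  else if st.2 then
    (if PySem.Str.startswith line "    def "
        || PySem.Str.startswith line "    # ==========================================" then
      (st.1 ++ [line], false)
     else st)
  else (st.1 ++ [line], st.2)

def remove_method_blocks (text : String) : String :=
  let lines := PySem.Str.splitlines text
  let st := lines.foldl pvStepA ([], false)
  PySem.Str.join "\n" st.1 ++ "\n"

-- ===== PORT B =====
-- outer cursor loop (pvScan) and the inner block-consuming loop (pvSkip) of Source B,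
-- the cursor i over lines rendered as structural recursion on the remaining suffix
mutual
def pvScan : List String → List String
  | [] => []
  | line :: rest =>
    if pvIsTarget line then pvSkip rest
    else line :: pvScan rest

def pvSkip : List String → List String
  | [] => []
  | l :: rest =>
    if pvIsTarget l then pvSkip rest
    else if PySem.Str.startswith l "    def "
        || PySem.Str.startswith l "    # ==========================================" then
      l :: pvScan rest
    else pvSkip rest
end

def remove_method_blocks_alt (text : String) : String :=
  PySem.Str.join "\n" (pvScan (PySem.Str.splitlines text)) ++ "\n"

-- ===== PRECONDITION & SPEC =====
def Spec_remove_method_blocks (text : String) (out : String) : Prop := out = remove_method_blocks_alt text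
instance (text : String) (out : String) : Decidable (Spec_remove_method_blocks text out) := by unfold Spec_remove_method_blocks; infer_instance

-- ===== CLAIM (what is proved, stated in full; the proofs are below) =====
def Claim_equal_remove_method_blocks : Prop := ∀ (text : String), Dom_remove_method_blocks text → Spec_remove_method_blocks text (remove_method_blocks text)

-- ===== LEMMAS AND PROOFS =====
-- A's flag-carrying fold equals B's mutual recursion, for both values of the flag
theorem pvFold_eq (ls : List String) : ∀ (out : List String),
    (ls.foldl pvStepA (out, false)).1 = out ++ pvScan ls
      ∧ (ls.foldl pvStepA (out, true)).1 = out ++ pvSkip ls := by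
  induction ls with
  | nil => intro out; simp [pvScan, pvSkip]
  | cons l rest ih =>
    intro out
    by_cases h : pvIsTarget l = true
    · simp only [List.foldl_cons, pvStepA, h, if_true, pvScan, pvSkip]
      exact ⟨(ih out).2, (ih out).2⟩
    · by_cases h2 : (PySem.Str.startswith l "    def "
          || PySem.Str.startswith l "    # ==========================================") = true
      all_goals simp only [List.foldl_cons, pvStepA, pvScan, pvSkip, h, h2,
        Bool.false_eq_true, if_false, if_true]
      · refine ⟨?_, ?_⟩ <;> · rw [(ih (out ++ [l])).1]; simp
      · refine ⟨?_, (ih out).2⟩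
        rw [(ih (out ++ [l])).1]; simp

-- ===== VERDICT (by name: the statement is the Claim_ definition above) =====
theorem remove_method_blocks_spec : Claim_equal_remove_method_blocks := by
  intro text _
  unfold Spec_remove_method_blocks remove_method_blocks remove_method_blocks_alt
  show PySem.Str.join "\n" (List.foldl pvStepA ([], false) (PySem.Str.splitlines text)).1 ++ "\n" = _
  rw [(pvFold_eq (PySem.Str.splitlines text) []).1]
  rfl
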